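-- pv_equiv track=rewrite | github.com/minterman2001/Erik_Minter_Python_Scripts | PythonScripts/isRelatedTo.py | isRelatedTo
-- ===== SOURCE A (Python) =====
-- def isRelatedTo(a, b, r):
--     if not r:
--         return False
--     else:
--         head = r[0]
--         tail = r[1:]
--         if a == head[0] and b == head[1]:
--             return True
--         elif a == head[1] and b == head[0]:
--             return True
--         else:
--             return isRelatedTo(a, b, tail)
-- ===== SOURCE B (Python) =====
-- def isRelatedTo(a, b, r):
--     return any(a == x and b == y or a == y and b == x for (x, y) in r)
-- ===== Notes on version B (the rewrite author's own statement) =====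
-- stated objective: idiomatic
-- what changed: Replaced the slicing tail recursion with a single any() generator pass over the pairs.
import Mathlib
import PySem

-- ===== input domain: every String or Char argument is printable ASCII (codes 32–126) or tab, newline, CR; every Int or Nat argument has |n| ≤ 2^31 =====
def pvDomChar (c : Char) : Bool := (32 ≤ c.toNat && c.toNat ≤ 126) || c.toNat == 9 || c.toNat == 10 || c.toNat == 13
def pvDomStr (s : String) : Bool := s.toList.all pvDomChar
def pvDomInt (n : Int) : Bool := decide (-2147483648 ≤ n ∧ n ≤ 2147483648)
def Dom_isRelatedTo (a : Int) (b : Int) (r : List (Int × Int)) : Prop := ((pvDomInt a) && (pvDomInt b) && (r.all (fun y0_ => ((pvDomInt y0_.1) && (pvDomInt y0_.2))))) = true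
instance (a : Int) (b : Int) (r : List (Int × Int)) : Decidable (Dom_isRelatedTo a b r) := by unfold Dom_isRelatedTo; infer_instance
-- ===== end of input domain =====

-- ===== PORT A =====
def isRelatedTo (a : Int) (b : Int) (r : List (Int × Int)) : Bool :=
  match r with
  | [] => false
  | head :: tail =>
    if a = head.1 && b = head.2 then true
    else if a = head.2 && b = head.1 then true
    else isRelatedTo a b tail

-- ===== PORT B =====
-- B: a single any-pass over the pairs (no slicing, no recursion)
def isRelatedTo_alt (a : Int) (b : Int) (r : List (Int × Int)) : Bool :=
  r.any (fun p => (a = p.1 && b = p.2) || (a = p.2 && b = p.1))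

-- ===== PRECONDITION & SPEC =====
def Spec_isRelatedTo (a : Int) (b : Int) (r : List (Int × Int)) (out : Bool) : Prop := out = isRelatedTo_alt a b r
instance (a : Int) (b : Int) (r : List (Int × Int)) (out : Bool) : Decidable (Spec_isRelatedTo a b r out) := by unfold Spec_isRelatedTo; infer_instance

-- ===== CLAIM (what is proved, stated in full; the proofs are below) =====
def Claim_equal_isRelatedTo : Prop := ∀ (a : Int) (b : Int) (r : List (Int × Int)), Dom_isRelatedTo a b r → Spec_isRelatedTo a b r (isRelatedTo a b r)

-- ===== LEMMAS AND PROOFS =====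

-- ===== VERDICT (by name: the statement is the Claim_ definition above) =====
theorem isRelatedTo_eq_alt (a b : Int) (r : List (Int × Int)) :
    isRelatedTo a b r = isRelatedTo_alt a b r := by
  induction r with
  | nil => rfl
  | cons head tail ih =>
    simp only [isRelatedTo, isRelatedTo_alt, List.any_cons] at *
    split_ifs with h1 h2 <;> simp_all

theorem isRelatedTo_spec : Claim_equal_isRelatedTo := by
  intro a b r _
  exact isRelatedTo_eq_alt a b r
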